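-- pv_equiv track=rewrite | github.com/PossumXI/Immaculate | training/q/build_q_benchmark_corpus.py | summarize_row_type
-- ===== SOURCE A (Python) =====
-- def summarize_row_type(records: list[dict]) -> str:
--     row_types = {
--         str(record.get("row_type", "decision_triplet")).strip() or "decision_triplet"
--         for record in records
--     }
--     if not row_types:
--         return "decision_triplet"
--     if len(row_types) == 1:
--         return next(iter(row_types))
--     return "mixed"
-- ===== SOURCE B (Python) =====
-- def summarize_row_type(records: list[dict]) -> str:
--     first = None
--     for record in records:
--         v = str(record.get("row_type", "decision_triplet")).strip() or "decision_triplet"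
--         if first is None:
--             first = v
--         elif v != first:
--             return "mixed"
--     return first if first is not None else "decision_triplet"
-- ===== Notes on version B (the rewrite author's own statement) =====
-- stated objective: simpler
-- what changed: Replaces the set-comprehension plus cardinality check with a single early-exit loop that keeps only the first normalized value and returns 'mixed' as soon as a different one appears.
import Mathlib
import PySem

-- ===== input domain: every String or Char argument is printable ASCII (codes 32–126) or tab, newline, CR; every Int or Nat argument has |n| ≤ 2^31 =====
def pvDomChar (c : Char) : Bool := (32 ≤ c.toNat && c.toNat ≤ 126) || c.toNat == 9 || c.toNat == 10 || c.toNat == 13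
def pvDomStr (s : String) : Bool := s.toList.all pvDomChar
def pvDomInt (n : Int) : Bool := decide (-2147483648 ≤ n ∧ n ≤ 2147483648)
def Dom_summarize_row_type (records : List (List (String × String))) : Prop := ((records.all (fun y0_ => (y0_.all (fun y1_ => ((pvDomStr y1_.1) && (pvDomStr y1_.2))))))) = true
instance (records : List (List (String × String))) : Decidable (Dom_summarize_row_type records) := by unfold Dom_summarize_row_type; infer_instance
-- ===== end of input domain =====

-- B replaces A's set-comprehension + cardinality check by an early-exit single pass keeping only the first normalized value (simpler; same result).

-- ===== PORT A =====
-- str(record.get("row_type","decision_triplet")).strip() or "decision_triplet"  (str() on a str is the identity)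
def pvNormA (record : List (String × String)) : String :=
  let t := PySem.Str.strip (PySem.Dict.getD (PySem.Dict.mk record) "row_type" "decision_triplet")
  if t = "" then "decision_triplet" else t

def summarize_row_type (records : List (List (String × String))) : String :=
  -- set comprehension: build the set by folding Set.add over the records
  let row_types : PySem.Set String :=
    records.foldl (fun s r => PySem.Set.add s (pvNormA r)) PySem.Set.empty
  if row_types = [] then "decision_triplet"
  else if PySem.Set.len row_types = 1 then row_types.headD ""   -- next(iter(s)); order-safe: the set is a singleton here
  else "mixed"

-- ===== PORT B =====
def pvNormB (record : List (String × String)) : String :=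
  let t := PySem.Str.strip (PySem.Dict.getD (PySem.Dict.mk record) "row_type" "decision_triplet")
  if t = "" then "decision_triplet" else t

-- early-exit loop: 'first' is the Option accumulator; "mixed" is returned as soon as a second distinct value appears
def pvScanB (first : Option String) : List (List (String × String)) → String
  | [] => match first with
          | some w => w
          | none => "decision_triplet"
  | r :: rest =>
    let v := pvNormB r
    match first with
    | none => pvScanB (some v) rest
    | some w => if v ≠ w then "mixed" else pvScanB (some w) rest

def summarize_row_type_alt (records : List (List (String × String))) : String :=
  pvScanB none records

-- ===== PRECONDITION & SPEC =====
def Spec_summarize_row_type (records : List (List (String × String))) (out : String) : Prop := out = summarize_row_type_alt records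
instance (records : List (List (String × String))) (out : String) : Decidable (Spec_summarize_row_type records out) := by unfold Spec_summarize_row_type; infer_instance

-- ===== CLAIM (what is proved, stated in full; the proofs are below) =====
def Claim_equal_summarize_row_type : Prop := ∀ (records : List (List (String × String))), Dom_summarize_row_type records → Spec_summarize_row_type records (summarize_row_type records)

-- ===== LEMMAS AND PROOFS =====

-- proof-only helper: the tail of A's body (definitionally equal to the if-chain after the fold)
def pvTailA (s : PySem.Set String) : String :=
  if s = [] then "decision_triplet" else if PySem.Set.len s = 1 then s.headD "" else "mixed"

theorem pvNorm_eq (r : List (String × String)) : pvNormA r = pvNormB r := rfl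

-- folding Set.add only appends: the accumulator is a prefix of the result
theorem foldl_add_prefix (l : List (List (String × String))) (s : PySem.Set String) :
    ∃ t, l.foldl (fun s r => PySem.Set.add s (pvNormA r)) s = s ++ t := by
  induction l generalizing s with
  | nil => exact ⟨[], by simp⟩
  | cons x xs ih =>
    rw [List.foldl_cons]
    by_cases h : PySem.Set.contains s (pvNormA x) = true
    · have hadd : PySem.Set.add s (pvNormA x) = s := by
        unfold PySem.Set.add; rw [if_pos h]
      rw [hadd]; exact ih s
    · have hadd : PySem.Set.add s (pvNormA x) = s ++ [pvNormA x] := by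
        unfold PySem.Set.add; rw [if_neg h]
      rw [hadd]
      obtain ⟨t, ht⟩ := ih (s ++ [pvNormA x])
      exact ⟨pvNormA x :: t, by rw [ht]; simp⟩

-- main invariant: with a singleton accumulator [w], A's tail computation equals B's scan with first = some w
theorem fold_eq_scan (l : List (List (String × String))) (w : String) :
    pvTailA (l.foldl (fun s r => PySem.Set.add s (pvNormA r)) [w]) = pvScanB (some w) l := by
  induction l generalizing w with
  | nil =>
    rw [List.foldl_nil]
    show pvTailA [w] = w
    simp [pvTailA, PySem.Set.len]
  | cons x xs ih =>
    rw [List.foldl_cons]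
    have hrhs : pvScanB (some w) (x :: xs)
        = if pvNormB x ≠ w then "mixed" else pvScanB (some w) xs := rfl
    by_cases h : pvNormA x = w
    · have hadd : PySem.Set.add [w] (pvNormA x) = [w] := by
        rw [h]; simp [PySem.Set.add, PySem.Set.contains]
      rw [hadd, hrhs, ← pvNorm_eq x, h]
      rw [if_neg (fun hc => hc rfl)]
      exact ih w
    · have hc : PySem.Set.contains [w] (pvNormA x) = false := by
        have hb : (pvNormA x == w) = false := beq_eq_false_iff_ne.mpr h
        unfold PySem.Set.contains
        rw [List.contains_cons, List.contains_nil]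
        simp [hb]
      have hadd : PySem.Set.add [w] (pvNormA x) = [w] ++ [pvNormA x] := by
        unfold PySem.Set.add; rw [hc]; simp
      rw [hadd]
      obtain ⟨t, ht⟩ := foldl_add_prefix xs ([w] ++ [pvNormA x])
      rw [ht]
      have hA : pvTailA ([w] ++ [pvNormA x] ++ t) = "mixed" := by
        simp only [pvTailA, PySem.Set.len, List.cons_append, List.nil_append]
        rw [if_neg (by simp), if_neg (by push_cast [List.length_cons]; omega)]
      rw [hA, hrhs]
      exact (if_pos h).symm

theorem summarize_row_type_spec : Claim_equal_summarize_row_type := by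
  intro records _
  unfold Spec_summarize_row_type
  cases records with
  | nil => rfl
  | cons r rest =>
    have hL : summarize_row_type (r :: rest)
        = pvTailA (rest.foldl (fun s r => PySem.Set.add s (pvNormA r))
            (PySem.Set.add PySem.Set.empty (pvNormA r))) := rfl
    have hadd0 : PySem.Set.add PySem.Set.empty (pvNormA r) = [pvNormA r] := by
      unfold PySem.Set.add
      rw [if_neg (by simp [PySem.Set.contains, PySem.Set.empty])]
      rfl
    have hR : summarize_row_type_alt (r :: rest) = pvScanB (some (pvNormA r)) rest := rfl
    rw [hL, hadd0, hR]
    exact fold_eq_scan rest (pvNormA r)
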